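-- pv_equiv track=rewrite | github.com/leideng/CANN-8.1.RC1 | Ascend/ascend-toolkit/8.1.RC1/opp/built-in/op_impl/ai_core/tbe/impl/util/attention_qkv_util.py | get_unit_muti_core
-- ===== SOURCE A (Python) =====
-- import math
--
-- def get_unit_muti_core(shape, block, max_unit, flag=False):
--     unit = max_unit
--     one_core_data = math.ceil(shape / block)
--     if flag is False:
--         while (unit > 1 and one_core_data % unit != 0):
--             unit = unit - 1
--     else:
--         while (unit > 1 and one_core_data % unit != 0):
--             unit = unit // 2
--     return unit
-- ===== SOURCE B (Python) =====
-- def get_unit_muti_core(shape, block, max_unit, flag=False):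
--     d = -((-shape) // block)  # ceil(shape/block), exact for |shape|,|block| <= 2**31
--     if max_unit <= 1 or d % max_unit == 0:
--         return max_unit
--     if flag:
--         u = max_unit
--         while u > 1 and d % u != 0:
--             u >>= 1
--         return u
--     # flag False: largest divisor of |d| that is <= max_unit, found by
--     # enumerating divisor pairs (i, |d|//i) up to sqrt(|d|)
--     n = abs(d)  # n >= 1 here, since d % max_unit != 0
--     best = 1
--     i = 1
--     while i * i <= n:
--         if n % i == 0:
--             if i <= max_unit and i > best:
--                 best = i
--             j = n // i
--             if j <= max_unit and j > best:
--                 best = j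
--         i += 1
--     return best
-- ===== Notes on version B (the rewrite author's own statement) =====
-- stated objective: faster
-- what changed: For flag=False, instead of counting unit down from max_unit one by one, B enumerates the divisor pairs (i, n//i) of n=|ceil(shape/block)| up to sqrt(n) and returns the largest divisor not exceeding max_unit; trivial cases (max_unit<=1 or max_unit already divides) are answered directly, and the flag=True halving chain stays a (logarithmic) loop.
import Mathlib
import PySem

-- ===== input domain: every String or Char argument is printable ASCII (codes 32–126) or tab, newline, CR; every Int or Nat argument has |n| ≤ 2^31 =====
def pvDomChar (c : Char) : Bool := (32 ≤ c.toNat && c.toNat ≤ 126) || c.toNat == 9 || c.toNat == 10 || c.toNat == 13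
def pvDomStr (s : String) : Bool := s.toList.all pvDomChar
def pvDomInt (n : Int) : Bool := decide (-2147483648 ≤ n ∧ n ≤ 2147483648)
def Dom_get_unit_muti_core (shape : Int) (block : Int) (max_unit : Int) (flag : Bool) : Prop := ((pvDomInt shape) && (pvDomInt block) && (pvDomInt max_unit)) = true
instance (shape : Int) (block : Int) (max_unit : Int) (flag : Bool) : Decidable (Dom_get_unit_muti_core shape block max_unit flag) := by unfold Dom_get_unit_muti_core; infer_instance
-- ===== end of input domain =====

-- B replaces A's unit-by-unit countdown (flag=False) with a sqrt-bounded enumeration of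
-- the divisor pairs of |ceil(shape/block)|, picking the largest divisor ≤ max_unit (faster).

-- ===== PORT A =====
-- while unit > 1 and one_core_data % unit != 0: unit = unit - 1
def pvLoopDec (d : Int) (unit : Int) : Int :=
  if h : 1 < unit ∧ PySem.Int.mod d unit ≠ 0 then pvLoopDec d (unit - 1) else unit
termination_by unit.toNat
decreasing_by omega

-- while unit > 1 and one_core_data % unit != 0: unit = unit // 2
def pvLoopHalf (d : Int) (unit : Int) : Int :=
  if h : 1 < unit ∧ PySem.Int.mod d unit ≠ 0 then pvLoopHalf d (PySem.Int.floordiv unit 2) else unit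
termination_by unit.toNat
decreasing_by
  have h2 : PySem.Int.floordiv unit 2 = unit / 2 := PySem.Int.floordiv_eq_ediv_of_pos (by omega)
  rw [h2]; omega

-- math.ceil(shape / block): exact as integer ceiling division on Dom (|shape|,|block| ≤ 2^31 < 2^53,
-- so the float quotient's rounding error is below the 1/|block| gap to the nearest integer)
def get_unit_muti_core (shape : Int) (block : Int) (max_unit : Int) (flag : Bool) : Int :=
  if flag = false then pvLoopDec (-(PySem.Int.floordiv (-shape) block)) max_unit
  else pvLoopHalf (-(PySem.Int.floordiv (-shape) block)) max_unit

-- ===== PORT B =====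
-- while i * i <= n: if n % i == 0: best = max(best, {i, n//i} filtered by <= max_unit); i += 1
def pvBestLoop (n : Int) (max_unit : Int) (i : Int) (best : Int) : Int :=
  if h : i * i ≤ n then
    let best' :=
      if PySem.Int.mod n i = 0 then
        let best1 := if i ≤ max_unit ∧ best < i then i else best
        let j := PySem.Int.floordiv n i
        if j ≤ max_unit ∧ best1 < j then j else best1
      else best
    pvBestLoop n max_unit (i + 1) best'
  else best
termination_by (n + 1 - i).toNat
decreasing_by
  have hin : i ≤ n := by
    by_cases hi : i ≤ 0
    · nlinarith
    · push_neg at hi; nlinarith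
  omega

-- B's flag=True halving loop (u >>= 1 on a positive u is u // 2)
def pvHalfB (d : Int) (u : Int) : Int :=
  if h : 1 < u ∧ PySem.Int.mod d u ≠ 0 then pvHalfB d (PySem.Int.floordiv u 2) else u
termination_by u.toNat
decreasing_by
  have h2 : PySem.Int.floordiv u 2 = u / 2 := PySem.Int.floordiv_eq_ediv_of_pos (by omega)
  rw [h2]; omega

-- d = ceil(shape/block) appears inline as -((-shape) // block), exact on Dom
def get_unit_muti_core_alt (shape : Int) (block : Int) (max_unit : Int) (flag : Bool) : Int :=
  if max_unit ≤ 1 ∨ PySem.Int.mod (-(PySem.Int.floordiv (-shape) block)) max_unit = 0 then max_unit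
  else if flag then pvHalfB (-(PySem.Int.floordiv (-shape) block)) max_unit
  else pvBestLoop |(-(PySem.Int.floordiv (-shape) block))| max_unit 1 1

-- ===== PRECONDITION & SPEC =====
-- Pre_ excludes exactly block = 0, where A raises ZeroDivisionError.
def Pre_get_unit_muti_core (shape : Int) (block : Int) (max_unit : Int) (flag : Bool) : Prop := block ≠ 0
instance (shape : Int) (block : Int) (max_unit : Int) (flag : Bool) : Decidable (Pre_get_unit_muti_core shape block max_unit flag) := by unfold Pre_get_unit_muti_core; infer_instance
def pvWitness_get_unit_muti_core : Int × Int × Int × Bool := (10, 3, 8, false)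

def Spec_get_unit_muti_core (shape : Int) (block : Int) (max_unit : Int) (flag : Bool) (out : Int) : Prop := out = get_unit_muti_core_alt shape block max_unit flag
instance (shape : Int) (block : Int) (max_unit : Int) (flag : Bool) (out : Int) : Decidable (Spec_get_unit_muti_core shape block max_unit flag out) := by unfold Spec_get_unit_muti_core; infer_instance

-- ===== CLAIM (what is proved, stated in full; the proofs are below) =====
def Claim_equal_get_unit_muti_core : Prop := ∀ (shape : Int) (block : Int) (max_unit : Int) (flag : Bool), Dom_get_unit_muti_core shape block max_unit flag → Pre_get_unit_muti_core shape block max_unit flag → Spec_get_unit_muti_core shape block max_unit flag (get_unit_muti_core shape block max_unit flag)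

-- ===== LEMMAS AND PROOFS =====

-- The two halving loops are the same recursion
theorem pvLoopHalf_eq_pvHalfB (d u : Int) : pvLoopHalf d u = pvHalfB d u := by
  induction u using pvLoopHalf.induct d with
  | case1 u h ih => rw [pvLoopHalf, pvHalfB, dif_pos h, dif_pos h]; exact ih
  | case2 u h => rw [pvLoopHalf, pvHalfB, dif_neg h, dif_neg h]

-- A's countdown returns the greatest v in [1,u] dividing d (1 always qualifies)
theorem pvLoopDec_char (d u : Int) (hu : 1 ≤ u) :
    pvLoopDec d u ∣ d ∧ 1 ≤ pvLoopDec d u ∧ pvLoopDec d u ≤ u ∧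
      ∀ v, v ∣ d → 1 ≤ v → v ≤ u → v ≤ pvLoopDec d u := by
  induction u using pvLoopDec.induct d with
  | case1 u h ih =>
    rw [pvLoopDec, dif_pos h]
    obtain ⟨h1, h2⟩ := h
    obtain ⟨ia, ib, ic, imax⟩ := ih (by omega)
    refine ⟨ia, ib, by omega, ?_⟩
    intro v hv h1v hvu
    rcases lt_or_eq_of_le hvu with hlt | heq
    · exact imax v hv h1v (by omega)
    · exact absurd ((PySem.Int.mod_eq_zero_iff_dvd d u).mpr (heq ▸ hv)) h2
  | case2 u h =>
    rw [pvLoopDec, dif_neg h]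
    by_cases hu1 : 1 < u
    · have hmod : PySem.Int.mod d u = 0 := by
        by_contra hc
        exact h ⟨hu1, hc⟩
      have hdvd : u ∣ d := (PySem.Int.mod_eq_zero_iff_dvd d u).mp hmod
      exact ⟨hdvd, hu, le_refl u, fun v _ _ hvu => hvu⟩
    · have hu1' : u = 1 := by omega
      subst hu1'
      exact ⟨one_dvd d, le_refl 1, le_refl 1, fun v _ h1v hvu => by omega⟩

-- if i·v ≤ n < (i+1)·v and v divides n, the cofactor of v is exactly i
theorem pvCofactor_eq (n i v : Int) (hn : 1 ≤ n) (h1v : 1 ≤ v) (hv : v ∣ n)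
    (hlo : i * v ≤ n) (hhi : n < (i + 1) * v) : i ∣ n ∧ n / i = v := by
  obtain ⟨w, hw⟩ := hv
  have hwi : w = i := by nlinarith
  refine ⟨⟨v, ?_⟩, ?_⟩
  · rw [hw, hwi]; ring
  · have hi0 : i ≠ 0 := by
      intro h0
      rw [h0] at hwi
      rw [hwi, mul_zero] at hw
      omega
    rw [hw, hwi]
    exact Int.mul_ediv_cancel v hi0

-- B's sqrt loop returns the greatest divisor of n in [1, M], given a valid partial best
theorem pvBestLoop_char (n M : Int) (hn : 1 ≤ n) :
    ∀ k i best, (n + 1 - i).toNat ≤ k → 1 ≤ i → best ∣ n → 1 ≤ best → best ≤ M →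
    (∀ v, v ∣ n → 1 ≤ v → v ≤ M → (v < i ∨ n < i * v) → v ≤ best) →
    pvBestLoop n M i best ∣ n ∧ 1 ≤ pvBestLoop n M i best ∧ pvBestLoop n M i best ≤ M ∧
      ∀ v, v ∣ n → 1 ≤ v → v ≤ M → v ≤ pvBestLoop n M i best := by
  intro k
  induction k with
  | zero =>
    intro i best hk hi hbd hb1 hbM hinv
    have hni : n < i := by omega
    have hno : ¬ i * i ≤ n := by nlinarith
    rw [pvBestLoop, dif_neg hno]
    refine ⟨hbd, hb1, hbM, ?_⟩
    intro v hv h1v hvM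
    refine hinv v hv h1v hvM (Or.inr ?_)
    nlinarith
  | succ k IH =>
    intro i best hk hi hbd hb1 hbM hinv
    by_cases h : i * i ≤ n
    · have hiin : i ≤ n := by nlinarith
      rw [pvBestLoop, dif_pos h]
      by_cases hmod : PySem.Int.mod n i = 0
      · -- i divides n: both i and n / i are offered as candidates
        have hidvd : i ∣ n := (PySem.Int.mod_eq_zero_iff_dvd n i).mp hmod
        have hfj : PySem.Int.floordiv n i = n / i := PySem.Int.floordiv_eq_ediv_of_pos (by omega)
        have hji : i * (n / i) = n := Int.mul_ediv_cancel' hidvd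
        have hjdvd : n / i ∣ n := ⟨i, (Int.ediv_mul_cancel hidvd).symm⟩
        have hj1 : 1 ≤ n / i := by nlinarith [hji]
        simp only [hmod, if_true, hfj]
        set best1 := if i ≤ M ∧ best < i then i else best with hb1def
        set best2 := if n / i ≤ M ∧ best1 < n / i then n / i else best1 with hb2def
        have hp1 : best1 ∣ n ∧ 1 ≤ best1 ∧ best1 ≤ M ∧ best ≤ best1 ∧ (i ≤ M → i ≤ best1) := by
          rw [hb1def]; split_ifs with hc
          · exact ⟨hidvd, by omega, hc.1, by omega, fun _ => le_refl i⟩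
          · refine ⟨hbd, hb1, hbM, le_refl best, fun hiM => ?_⟩
            by_contra hlt
            exact hc ⟨hiM, by omega⟩
        obtain ⟨q1, q2, q3, q4, q5⟩ := hp1
        have hp2 : best2 ∣ n ∧ 1 ≤ best2 ∧ best2 ≤ M ∧ best1 ≤ best2 ∧
            (n / i ≤ M → n / i ≤ best2) := by
          rw [hb2def]; split_ifs with hc
          · exact ⟨hjdvd, by omega, hc.1, by omega, fun _ => le_refl _⟩
          · refine ⟨q1, q2, q3, le_refl best1, fun hjM => ?_⟩
            by_contra hlt
            exact hc ⟨hjM, by omega⟩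
        obtain ⟨r1, r2, r3, r4, r5⟩ := hp2
        refine IH (i + 1) best2 (by omega) (by omega) r1 r2 r3 ?_
        intro v hv h1v hvM hcase
        rcases hcase with hlt | hgt
        · rcases lt_or_eq_of_le (by omega : v ≤ i) with h' | h'
          · exact le_trans (hinv v hv h1v hvM (Or.inl h')) (by omega)
          · subst h'; exact le_trans (q5 hvM) r4
        · by_cases hold : n < i * v
          · exact le_trans (hinv v hv h1v hvM (Or.inr hold)) (by omega)
          · push_neg at hold
            obtain ⟨_, hcof⟩ := pvCofactor_eq n i v hn h1v hv hold hgt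
            rw [← hcof]
            exact r5 (hcof ▸ hvM)
      · -- i does not divide n: best is unchanged
        simp only [hmod, if_false]
        refine IH (i + 1) best (by omega) (by omega) hbd hb1 hbM ?_
        intro v hv h1v hvM hcase
        refine hinv v hv h1v hvM ?_
        rcases hcase with hlt | hgt
        · rcases lt_or_eq_of_le (by omega : v ≤ i) with h' | h'
          · exact Or.inl h'
          · exact absurd ((PySem.Int.mod_eq_zero_iff_dvd n i).mpr (h' ▸ hv)) hmod
        · by_cases hold : n < i * v
          · exact Or.inr hold
          · push_neg at hold
            obtain ⟨hidvd, _⟩ := pvCofactor_eq n i v hn h1v hv hold hgt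
            exact absurd ((PySem.Int.mod_eq_zero_iff_dvd n i).mpr hidvd) hmod
    · rw [pvBestLoop, dif_neg h]
      push_neg at h
      refine ⟨hbd, hb1, hbM, ?_⟩
      intro v hv h1v hvM
      refine hinv v hv h1v hvM ?_
      by_cases hlt : v < i
      · exact Or.inl hlt
      · right; push_neg at hlt; nlinarith

-- ===== VERDICT (by name: the statement is the Claim_ definition above) =====
theorem get_unit_muti_core_spec : Claim_equal_get_unit_muti_core := by
  intro shape block max_unit flag _ _
  unfold Spec_get_unit_muti_core get_unit_muti_core get_unit_muti_core_alt
  by_cases htr : max_unit ≤ 1 ∨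
      PySem.Int.mod (-(PySem.Int.floordiv (-shape) block)) max_unit = 0
  · -- A's loop (either flavour) exits immediately and returns max_unit
    have hstop : ¬ (1 < max_unit ∧
        PySem.Int.mod (-(PySem.Int.floordiv (-shape) block)) max_unit ≠ 0) := by
      rintro ⟨ha, hb⟩
      rcases htr with h | h
      · omega
      · exact hb h
    rw [if_pos htr]
    cases flag
    · rw [if_pos (rfl : (false : Bool) = false), pvLoopDec, dif_neg hstop]
    · rw [if_neg (by simp : ¬ ((true : Bool) = false)), pvLoopHalf, dif_neg hstop]
  · rw [if_neg htr]
    push_neg at htr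
    obtain ⟨hM, hmod⟩ := htr
    have hM1 : 1 < max_unit := hM
    have hd0 : (-(PySem.Int.floordiv (-shape) block)) ≠ 0 := by
      intro h0
      rw [h0] at hmod
      exact hmod ((PySem.Int.mod_eq_zero_iff_dvd 0 max_unit).mpr (dvd_zero max_unit))
    have hn1 : 1 ≤ |(-(PySem.Int.floordiv (-shape) block))| := by
      rcases abs_pos.mpr hd0 with h
      omega
    cases flag
    · -- flag = False: countdown vs divisor enumeration
      rw [if_pos (rfl : (false : Bool) = false),
        if_neg (by simp : ¬ ((false : Bool) = true))]
      obtain ⟨a1, a2, a3, amax⟩ :=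
        pvLoopDec_char (-(PySem.Int.floordiv (-shape) block)) max_unit (by omega)
      have hinv0 : ∀ v, v ∣ |(-(PySem.Int.floordiv (-shape) block))| → 1 ≤ v →
          v ≤ max_unit →
          (v < 1 ∨ |(-(PySem.Int.floordiv (-shape) block))| < 1 * v) → v ≤ 1 := by
        intro v hv h1v _ hcase
        rcases hcase with h | h
        · omega
        · have := Int.le_of_dvd (by omega) hv
          omega
      obtain ⟨b1, b2, b3, bmax⟩ :=
        pvBestLoop_char |(-(PySem.Int.floordiv (-shape) block))| max_unit hn1
          (|(-(PySem.Int.floordiv (-shape) block))| + 1).toNat 1 1 (by omega) (le_refl 1)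
          (one_dvd _) (le_refl 1) (by omega) hinv0
      have hab := bmax _ ((dvd_abs _ _).mpr a1) a2 a3
      have hba := amax _ ((dvd_abs _ _).mp b1) b2 b3
      omega
    · -- flag = True: the same halving chain
      rw [if_neg (by simp : ¬ ((true : Bool) = false)), if_pos rfl]
      exact pvLoopHalf_eq_pvHalfB (-(PySem.Int.floordiv (-shape) block)) max_unit
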